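-- pv_equiv track=rewrite | github.com/AiZhanghan/Leetcode | 秋招/网易/网易云音乐/2.py | func
-- ===== SOURCE A (Python) =====
-- from collections import defaultdict
--
-- def func(nums, T, K):
--     """
--     Args:
--         nums: list[int]
--         T: int
--         K: int
--
--     Return:
--         int
--     """
--     res = 0
--     dic = defaultdict(list)
--
--     for i, num in enumerate(nums):
--         other = T - num
--         if other in dic:
--             for j in dic[other]:
--                 if i - j <= K:
--                     res += 1
--         dic[num].append(i)
--
--     return res
-- ===== SOURCE B (Python) =====
-- from collections import Counter
--
-- def func(nums, T, K):
--     # Sliding-window counter of the last max(K,0) elements: one O(n) pass.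
--     k = max(K, 0)
--     cnt = Counter()
--     res = 0
--     for i, num in enumerate(nums):
--         res += cnt[T - num]
--         cnt[num] += 1
--         if i >= k:
--             cnt[nums[i - k]] -= 1
--     return res
-- ===== Notes on version B (the rewrite author's own statement) =====
-- stated objective: alternative
-- what changed: Replaced the per-value index lists with an inner rescan over all equal-valued earlier indices by a single-pass sliding-window counter of the last max(K,0) elements, so the inner loop disappears (each index is added and removed exactly once).
import Mathlib
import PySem

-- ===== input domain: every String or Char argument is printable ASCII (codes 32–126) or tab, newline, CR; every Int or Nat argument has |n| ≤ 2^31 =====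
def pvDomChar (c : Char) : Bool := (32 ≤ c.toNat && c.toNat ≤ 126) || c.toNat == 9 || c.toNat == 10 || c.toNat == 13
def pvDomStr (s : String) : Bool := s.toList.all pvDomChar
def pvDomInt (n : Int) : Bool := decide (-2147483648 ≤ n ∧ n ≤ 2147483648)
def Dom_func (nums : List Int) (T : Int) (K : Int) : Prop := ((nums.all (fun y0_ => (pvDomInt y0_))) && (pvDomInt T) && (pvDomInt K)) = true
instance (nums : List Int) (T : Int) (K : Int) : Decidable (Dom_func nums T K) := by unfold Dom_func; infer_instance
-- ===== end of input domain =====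

-- B replaces A's per-value index lists (rescanned on every match) by a single-pass
-- sliding-window counter of the last max(K,0) elements.

-- ===== PORT A =====
-- loop body of A: count earlier indices j of value T-num with i - j <= K, then append i to dic[num].
-- 'if other in dic: for j in dic[other]: …' is ported as a loop over 'dic.getD other []'
-- (an absent key contributes an empty loop; the defaultdict creates entries only on append).
def stepA (T K : Int) (st : Int × PySem.Dict Int (List Int)) (p : Int × Int) :
    Int × PySem.Dict Int (List Int) :=
  let i := p.1
  let num := p.2
  let other := T - num
  let res := (st.2.getD other []).foldl (fun r j => if i - j ≤ K then r + 1 else r) st.1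
  (res, st.2.modify num [] (· ++ [i]))

def func (nums : List Int) (T : Int) (K : Int) : Int :=
  ((PySem.List.enumerate nums 0).foldl (stepA T K) (0, PySem.Dict.empty)).1

-- ===== PORT B =====
-- loop body of B: res += cnt[T-num]; cnt[num] += 1; if i >= k: cnt[nums[i-k]] -= 1
-- (nums[i-k] is in range whenever the guard holds, so pyGetD's default is never used).
def stepB (nums : List Int) (T k : Int) (st : Int × PySem.Dict Int Int) (p : Int × Int) :
    Int × PySem.Dict Int Int :=
  let i := p.1
  let num := p.2
  let res := st.1 + st.2.getD (T - num) 0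
  let cnt := st.2.modify num 0 (· + 1)
  let cnt := if k ≤ i then cnt.modify (PySem.List.pyGetD nums (i - k) 0) 0 (· - 1) else cnt
  (res, cnt)

def func_alt (nums : List Int) (T : Int) (K : Int) : Int :=
  let k := max K 0
  ((PySem.List.enumerate nums 0).foldl (stepB nums T k) (0, PySem.Dict.empty)).1

-- ===== PRECONDITION & SPEC =====
def Spec_func (nums : List Int) (T : Int) (K : Int) (out : Int) : Prop := out = func_alt nums T K
instance (nums : List Int) (T : Int) (K : Int) (out : Int) : Decidable (Spec_func nums T K out) := by unfold Spec_func; infer_instance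

-- ===== CLAIM (what is proved, stated in full; the proofs are below) =====
def Claim_equal_func : Prop := ∀ (nums : List Int) (T : Int) (K : Int), Dom_func nums T K → Spec_func nums T K (func nums T K)

-- ===== LEMMAS AND PROOFS =====

-- enumerate as a map over List.range
theorem enum_eq_range (nums : List Int) :
    PySem.List.enumerate nums 0
      = (List.range nums.length).map (fun (j : Nat) => ((j : Int), nums.getD j 0)) := by
  rw [PySem.List.enumerate_eq_map_pyRange (d := 0)]
  simp [PySem.List.len_eq, PySem.List.pyRange_zero_natCast, List.map_map, Function.comp]

-- counts with cutoffs a and a+1 differ exactly by the element a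
theorem countP_shift (P : Nat → Bool) (a m : Nat) (ha : a < m) :
    (List.range m).countP (fun j => P j && decide (a ≤ j))
      = (List.range m).countP (fun j => P j && decide (a + 1 ≤ j)) + (if P a then 1 else 0) := by
  induction m with
  | zero => omega
  | succ m ih =>
    rw [List.range_succ, List.countP_append, List.countP_append]
    by_cases h : a < m
    · rw [ih h]
      have h1 : a ≤ m := le_of_lt h
      simp [List.countP_cons, h1, h]
      omega
    · have ha' : a = m := by omega
      subst ha'
      have hc : ∀ j ∈ List.range a, (P j && decide (a ≤ j)) = true ↔ (P j && decide (a + 1 ≤ j)) = true := by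
        intro j hj
        simp only [List.mem_range] at hj
        have h1 : ¬ a ≤ j := by omega
        have h2 : ¬ a + 1 ≤ j := by omega
        simp [h1, h2]
      rw [List.countP_congr hc]
      simp [List.countP_cons]

-- A's dict after step n maps each value to the indices < n+1 holding it
theorem stepA_dict (nums : List Int) (T K : Int) (n : Nat) (st : Int × PySem.Dict Int (List Int))
    (hd : ∀ x, st.2.getD x [] = ((List.range n).filter (fun j => nums.getD j 0 == x)).map (fun (j : Nat) => (j : Int)))
    (x : Int) :
    (stepA T K st ((n : Int), nums.getD n 0)).2.getD x []
      = ((List.range (n+1)).filter (fun j => nums.getD j 0 == x)).map (fun (j : Nat) => (j : Int)) := by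
  simp only [stepA, List.range_succ, List.filter_append, List.map_append]
  rw [PySem.Dict.getD_modify]
  by_cases hx : x = nums.getD n 0
  · subst hx
    rw [hd]
    simp
  · rw [if_neg hx, hd]
    simp
    exact fun h => hx h.symm

-- B's counter after step n counts the indices < n+1 in the window [n+1-k, n]
theorem stepB_dict (nums : List Int) (T K : Int) (n : Nat) (st : Int × PySem.Dict Int Int)
    (hd : ∀ x, st.2.getD x 0 = ((List.range n).countP (fun j => nums.getD j 0 == x && decide (n - K.toNat ≤ j)) : Int))
    (x : Int) :
    (stepB nums T (max K 0) st ((n : Int), nums.getD n 0)).2.getD x 0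
      = ((List.range (n+1)).countP (fun j => nums.getD j 0 == x && decide (n + 1 - K.toNat ≤ j)) : Int) := by
  simp only [stepB]
  have hc1 : ∀ y, ((st.2.modify (nums.getD n 0) 0 (· + 1)).getD y 0)
      = ((List.range (n+1)).countP (fun j => nums.getD j 0 == y && decide (n - K.toNat ≤ j)) : Int) := by
    intro y
    rw [PySem.Dict.getD_modify, List.range_succ, List.countP_append]
    have hsing : List.countP (fun j => nums.getD j 0 == y && decide (n - K.toNat ≤ j)) [n]
        = if nums.getD n 0 == y then 1 else 0 := by
      simp [List.countP_cons]
    rw [hsing]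
    by_cases hy : y = nums.getD n 0
    · subst hy
      rw [hd]
      simp
    · rw [if_neg hy, hd]
      have hf : (nums.getD n 0 == y) = false := by
        simp only [beq_eq_false_iff_ne]
        exact fun h => hy h.symm
      rw [hf]
      simp
  by_cases hk : (max K 0 : Int) ≤ (n : Int)
  · rw [if_pos hk]
    have hidx : ((n : Int) - max K 0) = (((n - K.toNat : Nat)) : Int) := by omega
    rw [hidx, PySem.List.pyGetD_natCast, PySem.Dict.getD_modify]
    have hs := countP_shift (fun j => nums.getD j 0 == x) (n - K.toNat) (n + 1) (by omega)
    rw [show n - K.toNat + 1 = n + 1 - K.toNat by omega] at hs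
    beta_reduce at hs
    by_cases hx : x = nums.getD (n - K.toNat) 0
    · rw [if_pos hx, hc1]
      rw [hx] at hs ⊢
      simp only [beq_self_eq_true, if_true] at hs
      omega
    · rw [if_neg hx, hc1]
      rw [show (nums.getD (n - K.toNat) 0 == x) = false from by
        simp only [beq_eq_false_iff_ne]; exact fun h => hx h.symm] at hs
      simp only [Bool.false_eq_true, if_false, add_zero] at hs
      omega
  · rw [if_neg hk, hc1]
    rw [show n - K.toNat = 0 by omega, show n + 1 - K.toNat = 0 by omega]

-- the amount added to res at step n is the same on both sides
theorem res_step (nums : List Int) (T K : Int) (n : Nat)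
    (stA : Int × PySem.Dict Int (List Int)) (stB : Int × PySem.Dict Int Int)
    (hres : stA.1 = stB.1)
    (hdA : ∀ x, stA.2.getD x [] = ((List.range n).filter (fun j => nums.getD j 0 == x)).map (fun (j : Nat) => (j : Int)))
    (hdB : ∀ x, stB.2.getD x 0 = ((List.range n).countP (fun j => nums.getD j 0 == x && decide (n - K.toNat ≤ j)) : Int)) :
    (stepA T K stA ((n : Int), nums.getD n 0)).1 = (stepB nums T (max K 0) stB ((n : Int), nums.getD n 0)).1 := by
  simp only [stepA, stepB]
  rw [hdA, hdB, ← hres]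
  rw [PySem.List.foldl_ite_add_one]
  congr 1
  rw [List.countP_map, List.countP_filter]
  rw [List.countP_congr]
  intro j hj
  simp only [List.mem_range] at hj
  cases hb : (nums.getD j 0 == T - nums.getD n 0) <;> simp [Function.comp]
  constructor <;> intro h <;> omega

-- joint invariant of the two folds over the first n indices
theorem inv (nums : List Int) (T K : Int) (n : Nat) :
    (((List.range n).map (fun (j : Nat) => ((j : Int), nums.getD j 0))).foldl (stepA T K) (0, PySem.Dict.empty)).1
      = (((List.range n).map (fun (j : Nat) => ((j : Int), nums.getD j 0))).foldl (stepB nums T (max K 0)) (0, PySem.Dict.empty)).1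
    ∧ (∀ x, (((List.range n).map (fun (j : Nat) => ((j : Int), nums.getD j 0))).foldl (stepA T K) (0, PySem.Dict.empty)).2.getD x []
        = ((List.range n).filter (fun j => nums.getD j 0 == x)).map (fun (j : Nat) => (j : Int)))
    ∧ (∀ x, (((List.range n).map (fun (j : Nat) => ((j : Int), nums.getD j 0))).foldl (stepB nums T (max K 0)) (0, PySem.Dict.empty)).2.getD x 0
        = ((List.range n).countP (fun j => nums.getD j 0 == x && decide (n - K.toNat ≤ j)) : Int)) := by
  induction n with
  | zero =>
    refine ⟨rfl, ?_, ?_⟩ <;> intro x <;> simp [PySem.Dict.getD_empty]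
  | succ n ih =>
    obtain ⟨ihres, ihA, ihB⟩ := ih
    have hfoldA : (((List.range (n+1)).map (fun (j : Nat) => ((j : Int), nums.getD j 0))).foldl (stepA T K) (0, PySem.Dict.empty))
        = stepA T K (((List.range n).map (fun (j : Nat) => ((j : Int), nums.getD j 0))).foldl (stepA T K) (0, PySem.Dict.empty)) ((n : Int), nums.getD n 0) := by
      rw [List.range_succ, List.map_append, List.foldl_append]
      rfl
    have hfoldB : (((List.range (n+1)).map (fun (j : Nat) => ((j : Int), nums.getD j 0))).foldl (stepB nums T (max K 0)) (0, PySem.Dict.empty))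
        = stepB nums T (max K 0) (((List.range n).map (fun (j : Nat) => ((j : Int), nums.getD j 0))).foldl (stepB nums T (max K 0)) (0, PySem.Dict.empty)) ((n : Int), nums.getD n 0) := by
      rw [List.range_succ, List.map_append, List.foldl_append]
      rfl
    rw [hfoldA, hfoldB]
    exact ⟨res_step nums T K n _ _ ihres ihA ihB,
           stepA_dict nums T K n _ ihA,
           stepB_dict nums T K n _ ihB⟩

-- ===== VERDICT (by name: the statement is the Claim_ definition above) =====
theorem func_spec : Claim_equal_func := by
  intro nums T K _
  unfold Spec_func func func_alt
  rw [enum_eq_range]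
  exact (inv nums T K nums.length).1
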